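-- pv_equiv track=rewrite | github.com/deepshadow25/AlgorithmTest | 프로그래머스/unrated/155652. 둘만의 암호/둘만의 암호.py | solution
-- ===== SOURCE A (Python) =====
-- alphabet = 'abcdefghijklmnopqrstuvwxyz'
--
-- def solution(s, skip, index):
--     alpha_skipped = ''
--     for char in alphabet:
--         if char in list(skip):
--             pass
--         else:
--             alpha_skipped += char
--
--     alpha_shift = [alpha_skipped[(i+index)%len(alpha_skipped)] for i in range(len(alpha_skipped))]
--
--     answer = ''
--     for i in range(len(s)):
--         for j in range(len(alpha_skipped)):
--             if s[i] == alpha_skipped[j]: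
--                 answer += alpha_shift[j]
--
--     return answer
-- ===== SOURCE B (Python) =====
-- alphabet = 'abcdefghijklmnopqrstuvwxyz'
--
-- def solution(s, skip, index):
--     skipped = set(skip)
--     survivors = 26 - sum(1 for c in alphabet if c in skipped)
--     if survivors == 0:
--         return ''
--     r = index % survivors
--
--     def nxt(c):
--         # next surviving letter cyclically after c in char-code space
--         while True:
--             c = chr((ord(c) - 97 + 1) % 26 + 97)
--             if c not in skipped:
--                 return c
--
--     out = []
--     for c in s:
--         if 'a' <= c <= 'z' and c not in skipped:
--             for _ in range(r):
--                 c = nxt(c)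
--             out.append(c)
--     return ''.join(out)
-- ===== Notes on version B (the rewrite author's own statement) =====
-- stated objective: faster
-- what changed: B builds no shifted alphabet and no lookup table at all: it counts the surviving letters once, then translates each surviving lowercase letter of s by walking index%L steps along the cyclic successor function in char-code space (chr/ord arithmetic skipping skipped letters), dropping every other character.
import Mathlib
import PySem

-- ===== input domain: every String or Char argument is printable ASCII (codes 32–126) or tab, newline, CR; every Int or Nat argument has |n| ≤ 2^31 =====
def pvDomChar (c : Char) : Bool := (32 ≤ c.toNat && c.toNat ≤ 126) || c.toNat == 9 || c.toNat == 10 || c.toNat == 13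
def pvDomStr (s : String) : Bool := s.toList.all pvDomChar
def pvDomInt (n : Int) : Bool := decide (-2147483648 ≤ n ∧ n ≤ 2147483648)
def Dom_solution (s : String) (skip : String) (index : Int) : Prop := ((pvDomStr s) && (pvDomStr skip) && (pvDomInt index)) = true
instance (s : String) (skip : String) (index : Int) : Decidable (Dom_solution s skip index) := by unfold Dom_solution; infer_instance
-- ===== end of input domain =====

-- B builds no shifted alphabet and no lookup structure: each surviving letter of s is translated
-- by walking index % L steps through the cyclic successor function in char-code space.

def pvAlphabet : List Char := "abcdefghijklmnopqrstuvwxyz".toList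

-- ===== PORT A =====
def solution (s : String) (skip : String) (index : Int) : String :=
  let alphaSkipped : List Char :=
    pvAlphabet.foldl (fun acc ch => if ch ∈ skip.toList then acc else acc ++ [ch]) []
  let alphaShift : List Char :=
    (PySem.List.pyRange 0 (PySem.List.len alphaSkipped) 1).map
      (fun i => PySem.List.pyGetD alphaSkipped (PySem.Int.mod (i + index) (PySem.List.len alphaSkipped)) ' ')
  let answer : List Char :=
    (PySem.List.pyRange 0 (PySem.Str.len s) 1).foldl
      (fun acc i =>
        (PySem.List.pyRange 0 (PySem.List.len alphaSkipped) 1).foldl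
          (fun acc2 j =>
            if PySem.List.pyGetD s.toList i ' ' = PySem.List.pyGetD alphaSkipped j ' '
            then acc2 ++ [PySem.List.pyGetD alphaShift j ' ']
            else acc2) acc) []
  String.ofList answer

-- ===== PORT B =====
-- chr((ord(c) - 97 + 1) % 26 + 97) : the cyclically next letter in char-code space
def pvStep (c : Char) : Char :=
  Char.ofNat ((PySem.Int.mod ((c.toNat : Int) - 97 + 1) 26) + 97).toNat

-- the while-True loop of nxt; fuel 26 is a totality guard only (never exhausted when a letter survives)
def pvNxt (skipped : PySem.Set Char) : Nat → Char → Char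
  | 0, c => c
  | fuel+1, c =>
    if PySem.Set.contains skipped (pvStep c) then pvNxt skipped fuel (pvStep c) else pvStep c

-- for _ in range(r): c = nxt(c)
def pvWalk (skipped : PySem.Set Char) : Nat → Char → Char
  | 0, c => c
  | j+1, c => pvWalk skipped j (pvNxt skipped 26 c)

def solution_alt (s : String) (skip : String) (index : Int) : String :=
  let skipped : PySem.Set Char := PySem.Set.ofList skip.toList
  let survivors : Int := 26 - ((pvAlphabet.countP (fun c => PySem.Set.contains skipped c)) : Int)
  if survivors = 0 then "" else
    let r : Int := PySem.Int.mod index survivors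
    String.ofList (s.toList.foldl
      (fun out c =>
        if 'a' ≤ c ∧ c ≤ 'z' ∧ PySem.Set.contains skipped c = false
        then out ++ [pvWalk skipped r.toNat c] else out) [])

-- ===== PRECONDITION & SPEC =====
def Spec_solution (s : String) (skip : String) (index : Int) (out : String) : Prop := out = solution_alt s skip index
instance (s : String) (skip : String) (index : Int) (out : String) : Decidable (Spec_solution s skip index out) := by unfold Spec_solution; infer_instance

-- ===== CLAIM (what is proved, stated in full; the proofs are below) =====
def Claim_equal_solution : Prop := ∀ (s : String) (skip : String) (index : Int), Dom_solution s skip index → Spec_solution s skip index (solution s skip index)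

-- ===== LEMMAS AND PROOFS =====

def pvLetter (i : Nat) : Char := Char.ofNat (97 + i)

-- survival of alphabet position i w.r.t. the skip characters
def pvSv (sk : List Char) (i : Nat) : Bool := !(PySem.Set.contains (PySem.Set.ofList sk) (pvLetter i))

-- the surviving alphabet positions, increasing
def pvR (sk : List Char) : List Nat := (List.range 26).filter (pvSv sk)

theorem pv_alpha_eq : pvAlphabet = (List.range 26).map pvLetter := by decide

theorem pv_contains (sk : List Char) (x : Char) :
    PySem.Set.contains (PySem.Set.ofList sk) x = decide (x ∈ sk) := by
  simp [PySem.Set.contains, PySem.Set.mem_ofList]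

theorem pv_toNat_letter (i : Nat) (h : i < 26) : (pvLetter i).toNat = 97 + i := by
  interval_cases i <;> decide

theorem pv_step_letter (i : Nat) (h : i < 26) : pvStep (pvLetter i) = pvLetter ((i + 1) % 26) := by
  interval_cases i <;> decide

-- A's skip loop builds exactly the filtered alphabet
theorem pv_skipped_eq (skip : String) :
    pvAlphabet.foldl (fun acc ch => if ch ∈ skip.toList then acc else acc ++ [ch]) [] =
    pvAlphabet.filter (fun ch => !(decide (ch ∈ skip.toList))) := by
  have h : (fun (acc : List Char) ch => if ch ∈ skip.toList then acc else acc ++ [ch])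
      = (fun acc ch => if ¬ (ch ∈ skip.toList) then acc ++ [ch] else acc) := by
    funext acc ch; by_cases h : ch ∈ skip.toList <;> simp [h]
  rw [h, PySem.List.foldl_append_ite_eq_filter]
  simp

-- the filtered alphabet is the letters of the surviving positions
theorem pv_K_eq (sk : List Char) :
    pvAlphabet.filter (fun ch => !(decide (ch ∈ sk))) = (pvR sk).map pvLetter := by
  rw [pv_alpha_eq, List.filter_map]
  unfold pvR
  congr 1
  refine List.filter_congr ?_
  intro i hi
  simp [Function.comp, pvSv]

theorem pv_mem_R (sk : List Char) (i : Nat) (h : i ∈ pvR sk) : i < 26 := by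
  unfold pvR at h
  have := List.mem_filter.mp h
  simpa [List.mem_range] using this.1

theorem pv_nodup_R (sk : List Char) : (pvR sk).Nodup :=
  (List.nodup_range).filter _

theorem pv_nodup_K (sk : List Char) : ((pvR sk).map pvLetter).Nodup := by
  refine (pv_nodup_R sk).map_on ?_
  intro i hi j hj hEq
  have hi26 := pv_mem_R sk i hi
  have hj26 := pv_mem_R sk j hj
  have : (pvLetter i).toNat = (pvLetter j).toNat := by rw [hEq]
  rw [pv_toNat_letter i hi26, pv_toNat_letter j hj26] at this
  omega

-- the j-indices of a Nodup K matching c: none, or exactly the first index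
theorem pv_range_filter (K : List Char) (hnd : K.Nodup) (c : Char) :
    (PySem.List.pyRange 0 (K.length : Int) 1).filter
        (fun j => decide (c = PySem.List.pyGetD K j ' '))
    = (PySem.List.index? K c).elim [] (fun k => [(k : Int)]) := by
  rcases h : PySem.List.index? K c with _ | k
  · have hc : c ∉ K := (PySem.List.index?_eq_none_iff K c).mp h
    simp only [Option.elim]
    rw [List.filter_eq_nil_iff]
    intro j hj
    have hr := (PySem.List.mem_pyRange_one).mp hj
    have hmem : PySem.List.pyGetD K j ' ' ∈ K := by
      apply PySem.List.pyGetD_mem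
      constructor <;> omega
    simp only [decide_eq_true_eq]
    intro hEq; exact hc (hEq ▸ hmem)
  · obtain ⟨hk, hKk, -⟩ := PySem.List.getElem_of_index?_eq_some h
    have hsplit : PySem.List.pyRange 0 (K.length : Int) 1
        = PySem.List.pyRange 0 (k : Int) 1 ++ ((k : Int) :: PySem.List.pyRange ((k : Int) + 1) (K.length : Int) 1) := by
      rw [← PySem.List.pyRange_one_cons (by exact_mod_cast hk)]
      exact PySem.List.pyRange_one_append 0 (k : Int) (K.length : Int) (by positivity) (by exact_mod_cast hk.le)
    rw [hsplit, List.filter_append, List.filter_cons]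
    have hKj : ∀ (j : Nat), j < K.length → j ≠ k → ¬ (c = PySem.List.pyGetD K (j : Int) ' ') := by
      intro j hj hne hEq
      rw [PySem.List.pyGetD_natCast, List.getD_eq_getElem _ _ hj] at hEq
      exact hne (hnd.getElem_inj_iff.mp (hKk ▸ hEq.symm))
    have h1 : (PySem.List.pyRange 0 (k : Int) 1).filter (fun j => decide (c = PySem.List.pyGetD K j ' ')) = [] := by
      rw [List.filter_eq_nil_iff]
      intro j hj
      have hr := (PySem.List.mem_pyRange_one).mp hj
      have hj' : j = ((j.toNat : Nat) : Int) := by omega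
      simp only [decide_eq_true_eq]
      rw [hj']
      exact hKj j.toNat (by omega) (by omega)
    have h2 : (PySem.List.pyRange ((k : Int) + 1) (K.length : Int) 1).filter (fun j => decide (c = PySem.List.pyGetD K j ' ')) = [] := by
      rw [List.filter_eq_nil_iff]
      intro j hj
      have hr := (PySem.List.mem_pyRange_one).mp hj
      have hj' : j = ((j.toNat : Nat) : Int) := by omega
      simp only [decide_eq_true_eq]
      rw [hj']
      exact hKj j.toNat (by omega) (by omega)
    have h3 : (decide (c = PySem.List.pyGetD K (k : Int) ' ')) = true := by
      simp [PySem.List.pyGetD_natCast, List.getD, List.getElem?_eq_getElem hk, hKk]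
    simp [h1, h2, List.getElem?_eq_getElem hk, hKk]

-- the Int shift index of A equals the Nat rotation index of B
theorem pv_mod_shift (L : Nat) (hL : 0 < L) (index : Int) (k : Nat) :
    PySem.Int.mod ((k : Int) + index) (L : Int) =
      (((k + (PySem.Int.mod index (L : Int)).toNat) % L : Nat) : Int) := by
  have hLpos : (0 : Int) < (L : Int) := by exact_mod_cast hL
  have h1 : PySem.Int.mod ((k : Int) + index) (L : Int) = ((k : Int) + index) % (L : Int) :=
    PySem.Int.mod_eq_emod_of_pos hLpos
  have h2 : PySem.Int.mod index (L : Int) = index % (L : Int) :=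
    PySem.Int.mod_eq_emod_of_pos hLpos
  have hr0 : 0 ≤ index % (L : Int) := Int.emod_nonneg index (by omega)
  have hri : (((index % (L : Int)).toNat : Nat) : Int) = index % (L : Int) := Int.toNat_of_nonneg hr0
  rw [h1, h2]
  push_cast [Int.natCast_mod]
  rw [hri]
  conv_lhs => rw [Int.add_emod]
  conv_rhs => rw [Int.add_emod]
  rw [Int.emod_emod_of_dvd index (dvd_refl _)]

-- the fuel loop of nxt scans the cyclic position sequence a+1, a+2, … for the first survivor
theorem pv_nxt_trace (sk : List Char) (fuel : Nat) : ∀ (a : Nat), a < 26 →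
    pvNxt (PySem.Set.ofList sk) fuel (pvLetter a) =
      (match ((List.range fuel).map (fun t => (a + 1 + t) % 26)).find? (pvSv sk) with
       | some b => pvLetter b
       | none => pvLetter ((a + fuel) % 26)) := by
  induction fuel with
  | zero =>
    intro a ha
    simp [pvNxt, Nat.mod_eq_of_lt ha]
  | succ n ih =>
    intro a ha
    have hb : (a + 1) % 26 < 26 := Nat.mod_lt _ (by omega)
    rw [List.range_succ_eq_map, List.map_cons, List.map_map, List.find?_cons]
    have hmap : ((fun t => (a + 1 + t) % 26) ∘ (fun t => t + 1)) = (fun t => ((a + 1) % 26 + 1 + t) % 26) := by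
      funext t; simp [Function.comp]; omega
    have hstep : pvStep (pvLetter a) = pvLetter ((a + 1) % 26) := pv_step_letter a ha
    show (if PySem.Set.contains (PySem.Set.ofList sk) (pvStep (pvLetter a)) then _ else _) = _
    rw [hstep]
    by_cases hs : pvSv sk ((a + 1) % 26) = true
    · have hcont : PySem.Set.contains (PySem.Set.ofList sk) (pvLetter ((a + 1) % 26)) = false := by
        simpa [pvSv] using hs
      simp only [hcont, if_false, Bool.false_eq_true]
      have : (a + 1 + 0) % 26 = (a + 1) % 26 := by omega
      rw [this, hs]
    · have hs' : pvSv sk ((a + 1) % 26) = false := by simpa using hs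
      have hcont : PySem.Set.contains (PySem.Set.ofList sk) (pvLetter ((a + 1) % 26)) = true := by
        simpa [pvSv] using hs'
      simp only [hcont, if_true]
      rw [ih ((a + 1) % 26) hb, hmap]
      have : (a + 1 + 0) % 26 = (a + 1) % 26 := by omega
      rw [this, hs']
      have : ((a + 1) % 26 + n) % 26 = (a + (n + 1)) % 26 := by omega
      rw [this]

-- searching the cyclic sequence from a survivor finds the next survivor
theorem pv_find_cyc (sk : List Char) (p : Nat) (hp : p < (pvR sk).length) (a : Nat)
    (haEq : (pvR sk)[p]'hp = a) :
    ((List.range 26).map (fun t => (a + 1 + t) % 26)).find? (pvSv sk)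
      = (pvR sk)[(p + 1) % (pvR sk).length]? := by
  have ha26 : a < 26 := pv_mem_R sk a (haEq ▸ List.getElem_mem hp)
  -- split the cyclic sequence at the wrap
  have hsplit : (List.range 26).map (fun t => (a + 1 + t) % 26)
      = List.range' (a + 1) (25 - a) ++ List.range (a + 1) := by
    have h26 : List.range 26 = List.range (25 - a) ++ (List.range (a + 1)).map (fun x => (25 - a) + x) := by
      rw [← List.range_add]; congr 1; omega
    rw [h26, List.map_append, List.map_map]
    congr 1
    · rw [List.range'_eq_map_range]
      apply List.map_congr_left
      intro t ht
      rw [List.mem_range] at ht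
      show (a + 1 + t) % 26 = a + 1 + t
      omega
    · have hid : List.range (a + 1) = (List.range (a + 1)).map id := by simp
      conv_rhs => rw [hid]
      apply List.map_congr_left
      intro t ht
      rw [List.mem_range] at ht
      simp only [Function.comp, id]
      omega
  -- split range 26 at a+1 and decompose R as P1 ++ P2
  have hrange : List.range 26 = List.range (a + 1) ++ List.range' (a + 1) (25 - a) := by
    have h26 : List.range 26 = List.range (a + 1) ++ (List.range (25 - a)).map (fun x => (a + 1) + x) := by
      rw [← List.range_add]; congr 1; omega
    rw [h26, List.range'_eq_map_range]
  have hRdecomp : pvR sk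
      = (List.range (a + 1)).filter (pvSv sk) ++ (List.range' (a + 1) (25 - a)).filter (pvSv sk) := by
    unfold pvR
    rw [hrange, List.filter_append]
  have hP1le : ∀ x ∈ (List.range (a + 1)).filter (pvSv sk), x ≤ a := by
    intro x hx
    have := (List.mem_filter.mp hx).1
    rw [List.mem_range] at this; omega
  have hP2gt : ∀ x ∈ (List.range' (a + 1) (25 - a)).filter (pvSv sk), a < x := by
    intro x hx
    have := (List.mem_filter.mp hx).1
    rw [List.mem_range'] at this
    obtain ⟨i, -, hi⟩ := this
    omega
  have hpw : (pvR sk).Pairwise (· < ·) := (List.pairwise_lt_range).filter _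
  have hlen : ((List.range (a + 1)).filter (pvSv sk)).length
      + ((List.range' (a + 1) (25 - a)).filter (pvSv sk)).length = (pvR sk).length := by
    rw [hRdecomp, List.length_append]
  -- the prefix of survivors ≤ a has length exactly p+1
  have hP1len : ((List.range (a + 1)).filter (pvSv sk)).length = p + 1 := by
    by_contra hne
    rcases Nat.lt_or_ge p ((List.range (a + 1)).filter (pvSv sk)).length with hlt | hge
    · have hlt' : p + 1 < ((List.range (a + 1)).filter (pvSv sk)).length := by omega
      have hq : ((List.range (a + 1)).filter (pvSv sk)).length - 1 < (pvR sk).length := by omega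
      have hmem : (pvR sk)[((List.range (a + 1)).filter (pvSv sk)).length - 1]'hq
          ∈ (List.range (a + 1)).filter (pvSv sk) := by
        rw [List.getElem_of_eq hRdecomp hq, List.getElem_append_left (by omega)]
        exact List.getElem_mem _
      have hle := hP1le _ hmem
      have := (List.pairwise_iff_getElem.mp hpw) p
        (((List.range (a + 1)).filter (pvSv sk)).length - 1) hp hq (by omega)
      omega
    · have hmem : (pvR sk)[p]'hp ∈ (List.range' (a + 1) (25 - a)).filter (pvSv sk) := by
        rw [List.getElem_of_eq hRdecomp hp, List.getElem_append_right hge]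
        exact List.getElem_mem _
      have := hP2gt _ hmem
      omega
  have hP1take : (pvR sk).take (p + 1) = (List.range (a + 1)).filter (pvSv sk) := by
    rw [hRdecomp, ← hP1len]
    exact List.take_left
  have hP2drop : (pvR sk).drop (p + 1) = (List.range' (a + 1) (25 - a)).filter (pvSv sk) := by
    rw [hRdecomp, ← hP1len]
    exact List.drop_left
  rw [hsplit, List.find?_append, ← List.head?_filter, ← List.head?_filter, ← hP2drop, ← hP1take,
    List.head?_drop]
  rcases Nat.lt_or_ge (p + 1) (pvR sk).length with hlt | hge
  · rw [Nat.mod_eq_of_lt hlt, List.getElem?_eq_getElem hlt]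
    simp
  · have h0 : (p + 1) % (pvR sk).length = 0 := by
      have hEq : p + 1 = (pvR sk).length := by omega
      rw [hEq, Nat.mod_self]
    rw [h0, List.getElem?_eq_none hge]
    have htake : (pvR sk).take (p + 1) = pvR sk := List.take_of_length_le (by omega)
    rw [htake, Option.none_or, List.head?_eq_getElem?]

-- one nxt call advances one position in the surviving list, cyclically
theorem pv_nxt_succ (sk : List Char) (p : Nat) (hp : p < (pvR sk).length) :
    pvNxt (PySem.Set.ofList sk) 26 (pvLetter ((pvR sk).getD p 0))
      = pvLetter ((pvR sk).getD ((p + 1) % (pvR sk).length) 0) := by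
  have ha26 : (pvR sk)[p] < 26 := pv_mem_R sk _ (List.getElem_mem hp)
  rw [List.getD_eq_getElem _ _ hp]
  rw [pv_nxt_trace sk 26 _ ha26]
  rw [pv_find_cyc sk p hp _ rfl]
  have hlt : (p + 1) % (pvR sk).length < (pvR sk).length := Nat.mod_lt _ (by omega)
  rw [List.getElem?_eq_getElem hlt, List.getD_eq_getElem _ _ hlt]

-- walking j steps advances j positions in the surviving list
theorem pv_walk_eq (sk : List Char) (j : Nat) : ∀ (p : Nat), p < (pvR sk).length →
    pvWalk (PySem.Set.ofList sk) j (pvLetter ((pvR sk).getD p 0))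
      = pvLetter ((pvR sk).getD ((p + j) % (pvR sk).length) 0) := by
  induction j with
  | zero =>
    intro p hp
    simp [pvWalk, Nat.mod_eq_of_lt hp]
  | succ n ih =>
    intro p hp
    show pvWalk (PySem.Set.ofList sk) n (pvNxt (PySem.Set.ofList sk) 26 (pvLetter ((pvR sk).getD p 0))) = _
    rw [pv_nxt_succ sk p hp]
    have hlt : (p + 1) % (pvR sk).length < (pvR sk).length := Nat.mod_lt _ (by omega)
    rw [ih _ hlt]
    congr 1
    rw [Nat.mod_add_mod]
    have h2 : p + 1 + n = p + (n + 1) := by omega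
    rw [h2]

theorem pv_char_le (a b : Char) : (a ≤ b) = (a.toNat ≤ b.toNat) := by
  simp [Char.le_def]; rfl

-- characters between 'a' and 'z' are exactly the alphabet letters
theorem pv_mem_alpha (ch : Char) : ch ∈ pvAlphabet ↔ ('a' ≤ ch ∧ ch ≤ 'z') := by
  have h97 : 'a'.toNat = 97 := rfl
  have h122 : 'z'.toNat = 122 := rfl
  constructor
  · intro h
    rw [pv_alpha_eq, List.mem_map] at h
    obtain ⟨i, hi, hEq⟩ := h
    rw [List.mem_range] at hi
    subst hEq
    have ht := pv_toNat_letter i hi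
    rw [pv_char_le, pv_char_le, h97, h122, ht]
    omega
  · intro ⟨h1, h2⟩
    rw [pv_char_le, h97] at h1
    rw [pv_char_le, h122] at h2
    rw [pv_alpha_eq, List.mem_map]
    refine ⟨ch.toNat - 97, ?_, ?_⟩
    · rw [List.mem_range]; omega
    · show Char.ofNat (97 + (ch.toNat - 97)) = ch
      have h : 97 + (ch.toNat - 97) = ch.toNat := by omega
      rw [h, Char.ofNat_toNat]

-- membership in the surviving alphabet, as B's guard
theorem pv_guard_iff (sk : List Char) (ch : Char) :
    ch ∈ (pvR sk).map pvLetter ↔ ('a' ≤ ch ∧ ch ≤ 'z' ∧ PySem.Set.contains (PySem.Set.ofList sk) ch = false) := by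
  rw [← pv_K_eq sk, List.mem_filter]
  rw [pv_mem_alpha]
  rw [pv_contains]
  constructor
  · intro ⟨⟨h1, h2⟩, h3⟩
    refine ⟨h1, h2, ?_⟩
    simpa using h3
  · intro ⟨h1, h2, h3⟩
    refine ⟨⟨h1, h2⟩, ?_⟩
    simpa using h3

-- the survivor count computed by B is the length of the surviving list
theorem pv_survivors_eq (sk : List Char) :
    (26 : Int) - ((pvAlphabet.countP (fun c => PySem.Set.contains (PySem.Set.ofList sk) c)) : Int)
      = ((pvR sk).length : Int) := by
  have h1 : pvAlphabet.countP (fun c => PySem.Set.contains (PySem.Set.ofList sk) c)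
      = ((List.range 26).filter
          (fun i => PySem.Set.contains (PySem.Set.ofList sk) (pvLetter i))).length := by
    rw [pv_alpha_eq, List.countP_map, List.countP_eq_length_filter]
    rfl
  have hsplit := List.length_eq_length_filter_add (l := List.range 26)
      (f := fun i => PySem.Set.contains (PySem.Set.ofList sk) (pvLetter i))
  rw [List.length_range] at hsplit
  have hlenR : (pvR sk).length
      = ((List.range 26).filter
          (fun i => !(PySem.Set.contains (PySem.Set.ofList sk) (pvLetter i)))).length := rfl
  rw [h1, hlenR]
  omega

-- (map pvLetter).getD in terms of the position list
theorem pv_getD_map (R : List Nat) (m : Nat) (hm : m < R.length) :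
    (R.map pvLetter).getD m ' ' = pvLetter (R.getD m 0) := by
  rw [List.getD_eq_getElem _ _ (by simpa using hm), List.getD_eq_getElem _ _ hm, List.getElem_map]

-- the two programs agree on every input
theorem pv_main (s skip : String) (index : Int) :
    solution s skip index = solution_alt s skip index := by
  simp only [solution, solution_alt]
  rw [pv_skipped_eq skip, pv_K_eq skip.toList, pv_survivors_eq skip.toList]
  set K : List Char := (pvR skip.toList).map pvLetter with hK
  have hKR : K.length = (pvR skip.toList).length := by rw [hK, List.length_map]
  by_cases hnil : pvR skip.toList = []
  · rw [if_pos (by rw [hnil]; rfl)]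
    rw [hK, hnil]
    simp [PySem.List.len_eq, PySem.List.pyRange_one_eq_nil (le_refl (0 : Int))]
  · have hL : 0 < (pvR skip.toList).length := List.length_pos_iff.mpr hnil
    rw [if_neg (by omega)]
    simp only [PySem.List.len_eq, PySem.Str.len_eq]
    rw [PySem.List.foldl_pyRange_zero_pyGetD' s.toList ' '
        (fun acc ch => (PySem.List.pyRange 0 (K.length : Int) 1).foldl
          (fun acc2 j => if ch = PySem.List.pyGetD K j ' '
            then acc2 ++ [PySem.List.pyGetD ((PySem.List.pyRange 0 (K.length : Int) 1).map
              (fun i => PySem.List.pyGetD K (PySem.Int.mod (i + index) (K.length : Int)) ' ')) j ' ']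
            else acc2) acc) []]
    refine congrArg String.ofList ?_
    apply PySem.List.foldl_congr_mem'
    intro ch _ acc
    rw [PySem.List.foldl_append_ite (p := fun j => ch = PySem.List.pyGetD K j ' ')
      (f := fun j => PySem.List.pyGetD ((PySem.List.pyRange 0 (K.length : Int) 1).map
        (fun i => PySem.List.pyGetD K (PySem.Int.mod (i + index) (K.length : Int)) ' ')) j ' ')]
    rw [pv_range_filter K (hK ▸ pv_nodup_K skip.toList) ch]
    rcases h : PySem.List.index? K ch with _ | k
    · have hnot : ch ∉ K := (PySem.List.index?_eq_none_iff K ch).mp h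
      rw [hK] at hnot
      rw [if_neg (fun hg => hnot ((pv_guard_iff skip.toList ch).mpr hg))]
      simp
    · obtain ⟨hk, hKk, -⟩ := PySem.List.getElem_of_index?_eq_some h
      have hkR : k < (pvR skip.toList).length := by omega
      have hmem : ch ∈ K := hKk ▸ List.getElem_mem hk
      rw [hK] at hmem
      rw [if_pos ((pv_guard_iff skip.toList ch).mp hmem)]
      have hch : ch = pvLetter ((pvR skip.toList).getD k 0) := by
        rw [← hKk, ← List.getD_eq_getElem K ' ' hk, hK, pv_getD_map _ _ hkR]
      simp only [Option.elim, List.map]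
      rw [PySem.List.pyGetD_map_pyRange _ K.length k ' ' hk]
      rw [pv_mod_shift K.length (by omega) index k, PySem.List.pyGetD_natCast]
      rw [hKR, hK, pv_getD_map _ _ (Nat.mod_lt _ (by omega))]
      rw [hch, pv_walk_eq skip.toList (PySem.Int.mod index ((pvR skip.toList).length : Int)).toNat k hkR]

-- ===== VERDICT (by name: the statement is the Claim_ definition above) =====
theorem solution_spec : Claim_equal_solution := by
  intro s skip index _
  show solution s skip index = solution_alt s skip index
  exact pv_main s skip index
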